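-- pv_equiv track=rewrite | github.com/jefersondeoliveira/sentinel-code | tools/test_gen/planner.py | _infer_endpoint_from_fix
-- ===== SOURCE A (Python) =====
-- def _infer_endpoint_from_fix(fix: dict, endpoints: dict) -> str:
--     """Tenta inferir o endpoint associado ao fix pelo nome do arquivo."""
--     fix_file = fix.get("file", "").lower()
--
--     for endpoint in endpoints:
--         # Heurística: /products → ProductService, /orders → OrderService
--         endpoint_name = endpoint.strip("/").split("/")[0].lower()
--         if endpoint_name in fix_file:
--             return endpoint
--
--     # Fallback: primeiro endpoint GET disponível
--     for endpoint, method in endpoints.items():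
--         if method == "GET":
--             return endpoint
--
--     return "/api"
-- ===== SOURCE B (Python) =====
-- def _infer_endpoint_from_fix(fix: dict, endpoints: dict) -> str:
--     """Single fused pass: return the first substring-matched endpoint,
--     remembering the first GET endpoint as a fallback for after the loop."""
--     fix_file = fix.get("file", "").lower()
--     fallback = None
--     for endpoint, method in endpoints.items():
--         endpoint_name = endpoint.strip("/").split("/")[0].lower()
--         if endpoint_name in fix_file:
--             return endpoint
--         if fallback is None and method == "GET":
--             fallback = endpoint
--     return fallback if fallback is not None else "/api"
-- ===== Notes on version B (the rewrite author's own statement) =====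
-- stated objective: simpler
-- what changed: The two separate scans of the endpoints dict (substring match, then GET fallback) are fused into one pass that saves the first GET endpoint in an accumulator and returns it only after the whole loop finishes without a match.
import Mathlib
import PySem

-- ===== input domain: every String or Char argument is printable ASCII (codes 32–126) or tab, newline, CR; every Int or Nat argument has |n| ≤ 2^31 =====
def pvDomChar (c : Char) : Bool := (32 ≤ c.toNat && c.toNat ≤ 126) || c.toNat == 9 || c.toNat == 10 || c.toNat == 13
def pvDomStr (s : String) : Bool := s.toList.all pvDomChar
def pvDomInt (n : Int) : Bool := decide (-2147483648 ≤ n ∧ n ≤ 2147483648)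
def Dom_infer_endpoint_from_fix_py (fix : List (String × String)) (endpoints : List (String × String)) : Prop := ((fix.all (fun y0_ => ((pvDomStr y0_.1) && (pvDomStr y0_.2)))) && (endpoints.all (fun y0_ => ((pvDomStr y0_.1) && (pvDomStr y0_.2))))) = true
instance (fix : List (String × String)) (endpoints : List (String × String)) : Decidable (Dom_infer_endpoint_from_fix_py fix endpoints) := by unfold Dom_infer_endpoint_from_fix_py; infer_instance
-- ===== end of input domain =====

-- B fuses A's two scans of the endpoints dict into one pass carrying the first-GET fallback; same result, one traversal instead of two.

-- ===== PORT A =====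
-- endpoint.strip("/").split("/")[0].lower(); split("/") is never empty, so [0] is total
def pvEndpointName (ep : String) : String :=
  PySem.Str.lower (PySem.List.pyGetD ((PySem.Str.split? (PySem.Str.stripChars ep "/") "/").getD []) 0 "")

-- first loop of A: first endpoint whose name is a substring of fix_file
def pvALoop1 (ff : String) : List (String × String) → Option String
  | [] => none
  | (ep, _) :: rest =>
    if PySem.Str.isIn (pvEndpointName ep) ff then some ep else pvALoop1 ff rest

-- second loop of A: first endpoint whose method is "GET"
def pvALoop2 : List (String × String) → Option String
  | [] => none
  | (ep, m) :: rest => if m == "GET" then some ep else pvALoop2 rest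

def infer_endpoint_from_fix_py (fix : List (String × String)) (endpoints : List (String × String)) : String :=
  let fix_file := PySem.Str.lower ((fix.lookup "file").getD "")
  match pvALoop1 fix_file endpoints with
  | some ep => ep
  | none =>
    match pvALoop2 endpoints with
    | some ep => ep
    | none => "/api"

-- ===== PORT B =====
-- the single fused loop of Source B, carrying the first-GET fallback
def pvBLoop (ff : String) (fallback : Option String) : List (String × String) → String
  | [] => fallback.getD "/api"
  | (ep, m) :: rest =>
    if PySem.Str.isIn (pvEndpointName ep) ff then ep
    else pvBLoop ff (if fallback.isNone && m == "GET" then some ep else fallback) rest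

def infer_endpoint_from_fix_py_alt (fix : List (String × String)) (endpoints : List (String × String)) : String :=
  let fix_file := PySem.Str.lower ((fix.lookup "file").getD "")
  pvBLoop fix_file none endpoints

-- ===== PRECONDITION & SPEC =====
def Spec_infer_endpoint_from_fix_py (fix : List (String × String)) (endpoints : List (String × String)) (out : String) : Prop := out = infer_endpoint_from_fix_py_alt fix endpoints
instance (fix : List (String × String)) (endpoints : List (String × String)) (out : String) : Decidable (Spec_infer_endpoint_from_fix_py fix endpoints out) := by unfold Spec_infer_endpoint_from_fix_py; infer_instance

-- ===== CLAIM (what is proved, stated in full; the proofs are below) =====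
def Claim_equal_infer_endpoint_from_fix_py : Prop := ∀ (fix : List (String × String)) (endpoints : List (String × String)), Dom_infer_endpoint_from_fix_py fix endpoints → Spec_infer_endpoint_from_fix_py fix endpoints (infer_endpoint_from_fix_py fix endpoints)

-- ===== LEMMAS AND PROOFS =====
-- invariant of the fused loop: it is loop1's answer if any, else the carried fallback, else loop2's answer
theorem pvBLoop_eq (ff : String) (eps : List (String × String)) :
    ∀ fb : Option String,
      pvBLoop ff fb eps = ((pvALoop1 ff eps).orElse (fun _ => (fb.orElse (fun _ => pvALoop2 eps)))).getD "/api" := by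
  induction eps with
  | nil => intro fb; cases fb <;> simp [pvBLoop, pvALoop1, pvALoop2]
  | cons p rest ih =>
    intro fb
    obtain ⟨ep, m⟩ := p
    by_cases h : PySem.Chars.isIn (pvEndpointName ep).toList ff.toList = true
    · simp [pvBLoop, pvALoop1, PySem.Str.isIn_eq, h]
    · rw [show pvBLoop ff fb ((ep, m) :: rest) =
          pvBLoop ff (if fb.isNone && m == "GET" then some ep else fb) rest from by
            simp [pvBLoop, PySem.Str.isIn_eq, h]]
      rw [ih]
      cases fb with
      | some f => simp [pvALoop1, pvALoop2, PySem.Str.isIn_eq, h]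
      | none => by_cases hm : m == "GET" <;> simp [pvALoop1, pvALoop2, PySem.Str.isIn_eq, h, hm]

-- ===== VERDICT (by name: the statement is the Claim_ definition above) =====
theorem infer_endpoint_from_fix_py_spec : Claim_equal_infer_endpoint_from_fix_py := by
  intro fix endpoints _
  unfold Spec_infer_endpoint_from_fix_py infer_endpoint_from_fix_py infer_endpoint_from_fix_py_alt
  rw [pvBLoop_eq]
  cases h1 : pvALoop1 (PySem.Str.lower ((fix.lookup "file").getD "")) endpoints with
  | some ep => simp [h1]
  | none => cases h2 : pvALoop2 endpoints <;> simp [h1]
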